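-- pv_equiv track=rewrite | github.com/faccroot/pg_transformer_research | tools/analyze_sequence_shapes.py | shape_family
-- ===== SOURCE A (Python) =====
-- CONTENT_TAGS = frozenset({"ENTITY", "NUMBER", "URL", "EMAIL", "IDENT", "CONTENT"})
--
-- END_TAGS = frozenset({"PERIOD", "QMARK", "EMARK"})
--
-- def compress_tags(tags: list[str], *, exact_counts: bool = True) -> list[str]:
--     if not tags:
--         return []
--     out: list[str] = []
--     current = tags[0]
--     count = 1
--     for tag in tags[1:]:
--         if tag == current:
--             count += 1
--             continue
--         if count > 1:
--             out.append(f"{current}x{count}" if exact_counts else f"{current}+")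
--         else:
--             out.append(current)
--         current = tag
--         count = 1
--     if count > 1:
--         out.append(f"{current}x{count}" if exact_counts else f"{current}+")
--     else:
--         out.append(current)
--     return out
--
-- def shape_family(tags: list[str]) -> str:
--     family = []
--     for tag in tags:
--         if tag.startswith("OP_"):
--             family.append(tag)
--         elif tag in {"PRON", "DET", "PREP", "AUX"}:
--             family.append(tag)
--         elif tag == "COMMA":
--             family.append("COMMA")
--         elif tag in END_TAGS:
--             family.append("END")
--         elif tag in CONTENT_TAGS or tag in {"ENTITY", "CONTENT", "OTHER", "PUNCT", "COLON", "SEMI", "LPAREN", "RPAREN", "QUOTE", "DASH", "SLASH"}: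
--             family.append("ARG")
--         else:
--             family.append("ARG")
--     return " ".join(compress_tags(family, exact_counts=False))
-- ===== SOURCE B (Python) =====
-- END_TAGS = frozenset({"PERIOD", "QMARK", "EMARK"})
--
--
-- def _family(tag):
--     if tag.startswith("OP_") or tag in {"PRON", "DET", "PREP", "AUX", "COMMA"}:
--         return tag
--     return "END" if tag in END_TAGS else "ARG"
--
--
-- def _runs(fam):
--     if not fam:
--         return []
--     lab = fam[0]
--     rest = fam[1:]
--     run = 0
--     while run < len(rest) and rest[run] == lab:
--         run += 1
--     return [lab + "+" if run else lab] + _runs(rest[run:])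
--
--
-- def shape_family(tags):
--     return " ".join(_runs([_family(t) for t in tags]))
-- ===== Notes on version B (the rewrite author's own statement) =====
-- stated objective: simpler
-- what changed: Collapsed A's six-way branch chain into one conditional family mapping and replaced the iterative current/count run-length state machine by a recursion that peels one whole run per step.
import Mathlib
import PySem

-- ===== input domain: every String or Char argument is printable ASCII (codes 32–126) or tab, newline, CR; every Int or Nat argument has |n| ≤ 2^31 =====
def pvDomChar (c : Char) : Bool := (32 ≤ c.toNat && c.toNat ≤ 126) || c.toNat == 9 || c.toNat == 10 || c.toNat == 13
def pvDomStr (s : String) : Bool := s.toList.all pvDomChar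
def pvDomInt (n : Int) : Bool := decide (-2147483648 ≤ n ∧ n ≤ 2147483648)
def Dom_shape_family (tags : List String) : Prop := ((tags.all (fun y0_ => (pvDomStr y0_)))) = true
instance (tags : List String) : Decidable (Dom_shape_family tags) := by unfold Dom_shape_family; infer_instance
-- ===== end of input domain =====

-- B collapses A's six-way branch chain into one conditional family mapping and replaces the
-- iterative current/count run-length state machine by a recursion peeling one whole run per step
-- (objective: simpler; same O(n) cost).

-- ===== PORT A =====
-- the body of A's for-loop over tags (branches in A's order, incl. the redundant 5th branch)
def pvFamA (tag : String) : String :=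
  if PySem.Str.startswith tag "OP_" then tag
  else if tag == "PRON" || tag == "DET" || tag == "PREP" || tag == "AUX" then tag
  else if tag == "COMMA" then "COMMA"
  else if tag == "PERIOD" || tag == "QMARK" || tag == "EMARK" then "END"
  else if (tag == "ENTITY" || tag == "NUMBER" || tag == "URL" || tag == "EMAIL" ||
           tag == "IDENT" || tag == "CONTENT") ||
          (tag == "ENTITY" || tag == "CONTENT" || tag == "OTHER" || tag == "PUNCT" ||
           tag == "COLON" || tag == "SEMI" || tag == "LPAREN" || tag == "RPAREN" ||
           tag == "QUOTE" || tag == "DASH" || tag == "SLASH") then "ARG"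
  else "ARG"

-- the for-loop of compress_tags (state: out, current, count), with exact_counts = False
def pvLoopA : List String → List String → String → Nat → List String
  | [], out, current, count => out ++ [if count > 1 then current ++ "+" else current]
  | t :: ts, out, current, count =>
      if t == current then pvLoopA ts out current (count + 1)
      else pvLoopA ts (out ++ [if count > 1 then current ++ "+" else current]) t 1

def pvCompressA : List String → List String
  | [] => []
  | c :: rest => pvLoopA rest [] c 1

def shape_family (tags : List String) : String :=
  PySem.Str.join " " (pvCompressA (tags.foldl (fun acc t => acc ++ [pvFamA t]) []))

-- ===== PORT B =====
def pvFamB (tag : String) : String :=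
  if PySem.Str.startswith tag "OP_" || tag == "PRON" || tag == "DET" || tag == "PREP" ||
     tag == "AUX" || tag == "COMMA" then tag
  else if tag == "PERIOD" || tag == "QMARK" || tag == "EMARK" then "END"
  else "ARG"

-- Source B's while loop: length of the leading run of `lab` in `rest`
def pvCountRun (lab : String) : List String → Nat
  | [] => 0
  | x :: xs => if x == lab then pvCountRun lab xs + 1 else 0

def pvRunsB : List String → List String
  | [] => []
  | lab :: rest =>
      let run := pvCountRun lab rest
      (if run ≠ 0 then lab ++ "+" else lab) :: pvRunsB (rest.drop run)
  termination_by fam => fam.length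
  decreasing_by
    simp only [List.length_drop, List.length_cons]
    omega

def shape_family_alt (tags : List String) : String :=
  PySem.Str.join " " (pvRunsB (tags.map pvFamB))

-- ===== PRECONDITION & SPEC =====
def Spec_shape_family (tags : List String) (out : String) : Prop := out = shape_family_alt tags
instance (tags : List String) (out : String) : Decidable (Spec_shape_family tags out) := by unfold Spec_shape_family; infer_instance

-- ===== CLAIM (what is proved, stated in full; the proofs are below) =====
def Claim_equal_shape_family : Prop := ∀ (tags : List String), Dom_shape_family tags → Spec_shape_family tags (shape_family tags)

-- ===== LEMMAS AND PROOFS =====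
lemma pvFam_eq (t : String) : pvFamA t = pvFamB t := by
  unfold pvFamA pvFamB
  split_ifs <;> simp_all

lemma pvFoldl_map (f : String → String) :
    ∀ (l : List String) (acc : List String),
      l.foldl (fun a t => a ++ [f t]) acc = acc ++ l.map f
  | [], acc => by simp
  | x :: xs, acc => by simp [List.foldl_cons, pvFoldl_map f xs]

lemma pvCountRun_replicate (c : String) : ∀ k, pvCountRun c (List.replicate k c) = k
  | 0 => by simp [pvCountRun]
  | k + 1 => by simp [List.replicate_succ, pvCountRun, pvCountRun_replicate c k]

lemma pvCountRun_replicate_append (c t : String) (ts : List String) (h : (t == c) = false) :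
    ∀ k, pvCountRun c (List.replicate k c ++ t :: ts) = k
  | 0 => by simp [pvCountRun, h]
  | k + 1 => by
      simp [List.replicate_succ, pvCountRun, pvCountRun_replicate_append c t ts h k]

lemma pvLoopA_runsB :
    ∀ (ts : List String) (out : List String) (c : String) (n : Nat), 1 ≤ n →
      pvLoopA ts out c n = out ++ pvRunsB (List.replicate n c ++ ts)
  | [], out, c, n, hn => by
      rw [pvLoopA, List.append_nil]
      obtain ⟨m, rfl⟩ : ∃ m, n = m + 1 := ⟨n - 1, by omega⟩
      rw [List.replicate_succ, pvRunsB]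
      simp only [pvCountRun_replicate, List.drop_replicate]
      rw [show m - m = 0 from by omega, List.replicate_zero, pvRunsB]
      congr 1
      by_cases hm : m = 0
      · simp [hm]
      · have h1 : m + 1 > 1 := by omega
        simp [hm, h1]
  | t :: ts, out, c, n, hn => by
      rw [pvLoopA]
      by_cases h : (t == c) = true
      · rw [if_pos h]
        have ht : t = c := by simpa using h
        rw [pvLoopA_runsB ts out c (n + 1) (by omega)]
        congr 2
        rw [ht, List.replicate_succ' (n := n)]
        simp
      · rw [if_neg h]
        rw [pvLoopA_runsB ts _ t 1 (by omega)]
        obtain ⟨m, rfl⟩ : ∃ m, n = m + 1 := ⟨n - 1, by omega⟩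
        have hc : pvCountRun c (List.replicate m c ++ t :: ts) = m :=
          pvCountRun_replicate_append c t ts (by simpa using h) m
        have hr : pvRunsB (List.replicate (m + 1) c ++ t :: ts)
            = (if m + 1 > 1 then c ++ "+" else c) :: pvRunsB (t :: ts) := by
          rw [List.replicate_succ, List.cons_append, pvRunsB]
          simp only [hc]
          rw [List.drop_append_of_le_length (by simp), List.drop_replicate,
            show m - m = 0 from by omega, List.replicate_zero, List.nil_append]
          congr 1
          by_cases hm : m = 0
          · simp [hm]
          · have h1 : m + 1 > 1 := by omega
            simp [hm, h1]
        rw [hr, List.replicate_one, List.singleton_append, List.append_assoc,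
          List.singleton_append]

lemma pvCompressA_eq_runsB (fam : List String) : pvCompressA fam = pvRunsB fam := by
  cases fam with
  | nil => rw [pvCompressA, pvRunsB]
  | cons c rest =>
      rw [pvCompressA, pvLoopA_runsB rest [] c 1 (by omega)]
      simp

-- ===== VERDICT (by name: the statement is the Claim_ definition above) =====
theorem shape_family_spec : Claim_equal_shape_family := by
  intro tags _
  unfold Spec_shape_family shape_family shape_family_alt
  rw [pvFoldl_map, List.nil_append, pvCompressA_eq_runsB,
    show tags.map pvFamA = tags.map pvFamB from
      List.map_congr_left fun x _ => pvFam_eq x]
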